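-- pv_equiv track=rewrite | github.com/arin17bishwa/myCP_sols | CF/1455B.py | func
-- ===== SOURCE A (Python) =====
-- def func(n):
--     low = 1
--     high = 1414
--     while low < high:
--         mid = ((low + high) // 2)
--         k = (mid * (mid + 1)) // 2
--         if k >= n:
--             high = mid
--         else:
--             low = mid + 1
--
--     return high - n + (high * (high + 1)) >> 1
-- ===== SOURCE B (Python) =====
-- def func(n):
--     k = 1
--     while k < 1414 and k * (k + 1) // 2 < n:
--         k += 1
--     return k - n + k * (k + 1) >> 1
-- ===== Notes on version B (the rewrite author's own statement) =====
-- stated objective: simpler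
-- what changed: Replaces A's binary search over [1,1414] with a plain linear scan for the least k in that range whose triangular number reaches n.
import Mathlib
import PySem

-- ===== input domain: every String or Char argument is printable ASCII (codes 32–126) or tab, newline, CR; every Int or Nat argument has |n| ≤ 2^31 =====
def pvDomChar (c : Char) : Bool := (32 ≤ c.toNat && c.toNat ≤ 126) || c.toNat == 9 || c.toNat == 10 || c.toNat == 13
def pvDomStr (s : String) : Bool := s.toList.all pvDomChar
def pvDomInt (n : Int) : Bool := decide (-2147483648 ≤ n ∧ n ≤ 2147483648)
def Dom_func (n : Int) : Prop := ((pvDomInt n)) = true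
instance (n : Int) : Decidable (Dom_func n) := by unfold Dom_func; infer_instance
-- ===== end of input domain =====

-- B replaces A's binary search by a linear scan over the same range; equivalence holds on the whole domain.

-- ===== PORT A =====
-- the while-loop of A, recursion on high - low
def funcLoop (n low high : Int) : Int :=
  if _h : low < high then
    let mid := PySem.Int.floordiv (low + high) 2
    let k := PySem.Int.floordiv (mid * (mid + 1)) 2
    if k ≥ n then funcLoop n low mid else funcLoop n (mid + 1) high
  else high
termination_by (high - low).toNat
decreasing_by
  · have h1 : PySem.Int.floordiv (low + high) 2 < high :=
      (PySem.Int.floordiv_lt_iff_lt_mul (by omega)).mpr (by omega)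
    omega
  · have h2 : low ≤ PySem.Int.floordiv (low + high) 2 :=
      (PySem.Int.le_floordiv_iff_mul_le (by omega)).mpr (by omega)
    omega

def func (n : Int) : Int :=
  let high := funcLoop n 1 1414
  (high - n + (high * (high + 1))) >>> (1 : Nat)

-- ===== PORT B =====
-- the while-loop of B, recursion on 1414 - k
def funcAltLoop (n k : Int) : Int :=
  if _h : k < 1414 ∧ PySem.Int.floordiv (k * (k + 1)) 2 < n then funcAltLoop n (k + 1)
  else k
termination_by (1414 - k).toNat
decreasing_by omega

def func_alt (n : Int) : Int :=
  let k := funcAltLoop n 1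
  (k - n + (k * (k + 1))) >>> (1 : Nat)

-- ===== PRECONDITION & SPEC =====
def Spec_func (n : Int) (out : Int) : Prop := out = func_alt n
instance (n : Int) (out : Int) : Decidable (Spec_func n out) := by unfold Spec_func; infer_instance

-- ===== CLAIM (what is proved, stated in full; the proofs are below) =====
def Claim_equal_func : Prop := ∀ (n : Int), Dom_func n → Spec_func n (func n)

-- ===== LEMMAS AND PROOFS =====

-- triangular numbers are monotone on positives
lemma tri_mono {j c : Int} (h1 : 1 ≤ j) (h2 : j ≤ c) : j * (j + 1) ≤ c * (c + 1) := by nlinarith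

-- the binary-search loop returns the unique h in [low,high] that is the least index
-- satisfying 2n ≤ h(h+1), or high if there is none in the interval
lemma loop_char (n : Int) (d : Nat) : ∀ low high h : Int, (high - low).toNat ≤ d →
    1 ≤ low → low ≤ high → low ≤ h → h ≤ high →
    (2 * n ≤ h * (h + 1) ∨ h = high) →
    (∀ j, low ≤ j → j < h → j * (j + 1) < 2 * n) →
    funcLoop n low high = h := by
  induction d with
  | zero =>
    intro low high h hd _ hlh hl hh _ _
    rw [funcLoop]
    simp only [show ¬ low < high by omega, dite_false]
    omega
  | succ d ih =>
    intro low high h hd h1l hlh hl hh hdisj hlt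
    rw [funcLoop]
    by_cases hc : low < high
    · simp only [hc, dite_true]
      have hmlt : PySem.Int.floordiv (low + high) 2 < high :=
        (PySem.Int.floordiv_lt_iff_lt_mul (by omega)).mpr (by omega)
      have hmle : low ≤ PySem.Int.floordiv (low + high) 2 :=
        (PySem.Int.le_floordiv_iff_mul_le (by omega)).mpr (by omega)
      generalize hmid : PySem.Int.floordiv (low + high) 2 = mid at hmlt hmle ⊢
      by_cases hk : PySem.Int.floordiv (mid * (mid + 1)) 2 ≥ n
      · rw [if_pos hk]
        have hk' : 2 * n ≤ mid * (mid + 1) := by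
          have := (PySem.Int.le_floordiv_iff_mul_le (by omega)).mp hk
          omega
        have hhm : h ≤ mid := by
          by_contra hcon
          have := hlt mid hmle (by omega)
          omega
        have hdisj' : 2 * n ≤ h * (h + 1) ∨ h = mid := by
          rcases hdisj with h' | h'
          · exact Or.inl h'
          · omega
        exact ih low mid h (by omega) h1l (by omega) hl hhm hdisj' hlt
      · rw [if_neg hk]
        have hk' : mid * (mid + 1) < 2 * n := by
          have := (PySem.Int.floordiv_lt_iff_lt_mul (by omega)).mp (by omega :
            PySem.Int.floordiv (mid * (mid + 1)) 2 < n)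
          omega
        have hmh : mid + 1 ≤ h := by
          by_contra hcon
          rcases hdisj with h' | h'
          · have : h * (h + 1) ≤ mid * (mid + 1) := tri_mono (by omega) (by omega)
            omega
          · omega
        exact ih (mid + 1) high h (by omega) (by omega) (by omega) hmh hh hdisj
          (fun j hj1 hj2 => hlt j (by omega) hj2)
    · simp only [hc, dite_false]
      omega

-- B's linear scan from k reaches a result with the same characterisation
lemma altLoop_props (n : Int) (d : Nat) : ∀ k : Int, (1414 - k).toNat ≤ d →
    1 ≤ k → k ≤ 1414 →
    k ≤ funcAltLoop n k ∧ funcAltLoop n k ≤ 1414 ∧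
    (2 * n ≤ funcAltLoop n k * (funcAltLoop n k + 1) ∨ funcAltLoop n k = 1414) ∧
    (∀ j, k ≤ j → j < funcAltLoop n k → j * (j + 1) < 2 * n) := by
  induction d with
  | zero =>
    intro k hd h1 h2
    have hk : k = 1414 := by omega
    rw [funcAltLoop]
    simp only [show ¬ (k < 1414 ∧ PySem.Int.floordiv (k * (k + 1)) 2 < n) by omega,
      dite_false]
    exact ⟨le_rfl, h2, Or.inr hk, fun j hj1 hj2 => by omega⟩
  | succ d ih =>
    intro k hd h1 h2
    rw [funcAltLoop]
    by_cases hc : k < 1414 ∧ PySem.Int.floordiv (k * (k + 1)) 2 < n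
    · rw [dif_pos hc]
      have hk' : k * (k + 1) < 2 * n := by
        have := (PySem.Int.floordiv_lt_iff_lt_mul (by omega)).mp hc.2
        omega
      obtain ⟨p1, p2, p3, p4⟩ := ih (k + 1) (by omega) (by omega) (by omega)
      refine ⟨by omega, p2, p3, fun j hj1 hj2 => ?_⟩
      by_cases h' : j = k
      · subst h'; omega
      · exact p4 j (by omega) hj2
    · rw [dif_neg hc]
      refine ⟨le_rfl, h2, ?_, fun j hj1 hj2 => by omega⟩
      by_cases hlt : k < 1414
      · left
        have hge : n ≤ PySem.Int.floordiv (k * (k + 1)) 2 := by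
          by_contra hcon
          exact hc ⟨hlt, by omega⟩
        have := (PySem.Int.le_floordiv_iff_mul_le (by omega)).mp hge
        omega
      · right; omega

-- ===== VERDICT (by name: the statement is the Claim_ definition above) =====
theorem func_spec : Claim_equal_func := by
  intro n _
  unfold Spec_func func func_alt
  obtain ⟨p1, p2, p3, p4⟩ := altLoop_props n 1413 1 (by norm_num) (by norm_num) (by norm_num)
  have h := loop_char n 1413 1 1414 (funcAltLoop n 1) (by norm_num) (by norm_num)
    (by norm_num) p1 p2 p3 p4
  rw [h]
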